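-- pv_equiv track=rewrite | github.com/cp5337/sx9 | .qodo/04-abe-iac/node-interview-generator/yaml_dsl_pipeline.py | map_technique_to_hd4
-- ===== SOURCE A (Python) =====
-- from typing import Dict, List, Optional, Any, Tuple
--
-- TACTIC_HD4_MAP = {
--     "reconnaissance": "HUNT",
--     "resource-development": "HUNT",
--     "initial-access": "DETECT",
--     "execution": "DETECT",
--     "persistence": "DISABLE",
--     "privilege-escalation": "DISABLE",
--     "defense-evasion": "DISRUPT",
--     "credential-access": "DISRUPT",
--     "discovery": "DETECT",
--     "lateral-movement": "DISRUPT",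
--     "collection": "DISRUPT",
--     "command-and-control": "DISABLE",
--     "exfiltration": "DOMINATE",
--     "impact": "DOMINATE",
-- }
--
-- def map_technique_to_hd4(technique: Dict) -> str:
--     """Map technique to HD4 phase."""
--     tactics = technique.get("tactic", []) or technique.get("tactics", [])
--     if isinstance(tactics, str):
--         tactics = [tactics]
--
--     hd4_phases = set()
--     for tactic in tactics:
--         tactic_norm = tactic.lower().replace(" ", "-")
--         if tactic_norm in TACTIC_HD4_MAP:
--             hd4_phases.add(TACTIC_HD4_MAP[tactic_norm])
--
--     # Return primary phase (priority: DOMINATE > DISRUPT > DISABLE > DETECT > HUNT)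
--     priority = ["DOMINATE", "DISRUPT", "DISABLE", "DETECT", "HUNT"]
--     for phase in priority:
--         if phase in hd4_phases:
--             return phase
--     return "DETECT"
-- ===== SOURCE B (Python) =====
-- TACTIC_HD4_MAP = {
--     "reconnaissance": "HUNT",
--     "resource-development": "HUNT",
--     "initial-access": "DETECT",
--     "execution": "DETECT",
--     "persistence": "DISABLE",
--     "privilege-escalation": "DISABLE",
--     "defense-evasion": "DISRUPT",
--     "credential-access": "DISRUPT",
--     "discovery": "DETECT",
--     "lateral-movement": "DISRUPT",
--     "collection": "DISRUPT",
--     "command-and-control": "DISABLE",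
--     "exfiltration": "DOMINATE",
--     "impact": "DOMINATE",
-- }
--
-- _PRIORITY = ["DOMINATE", "DISRUPT", "DISABLE", "DETECT", "HUNT"]
-- _RANK = {phase: i for i, phase in enumerate(_PRIORITY)}
--
-- def map_technique_to_hd4(technique):
--     """Map technique to HD4 phase (single running-minimum pass, no set)."""
--     tactics = technique.get("tactic", []) or technique.get("tactics", [])
--     if isinstance(tactics, str):
--         tactics = [tactics]
--
--     best = 5  # sentinel: beyond the last priority index
--     for tactic in tactics:
--         r = _RANK.get(TACTIC_HD4_MAP.get(tactic.lower().replace(" ", "-")), 5)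
--         if r < best:
--             best = r
--     return _PRIORITY[best] if best < 5 else "DETECT"
-- ===== Notes on version B (the rewrite author's own statement) =====
-- stated objective: simpler
-- what changed: Replaced A's phase-set accumulation followed by a scan over the priority list with a single running-minimum pass over the tactics that tracks the smallest priority rank seen (sentinel 5 meaning no match).
import Mathlib
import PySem

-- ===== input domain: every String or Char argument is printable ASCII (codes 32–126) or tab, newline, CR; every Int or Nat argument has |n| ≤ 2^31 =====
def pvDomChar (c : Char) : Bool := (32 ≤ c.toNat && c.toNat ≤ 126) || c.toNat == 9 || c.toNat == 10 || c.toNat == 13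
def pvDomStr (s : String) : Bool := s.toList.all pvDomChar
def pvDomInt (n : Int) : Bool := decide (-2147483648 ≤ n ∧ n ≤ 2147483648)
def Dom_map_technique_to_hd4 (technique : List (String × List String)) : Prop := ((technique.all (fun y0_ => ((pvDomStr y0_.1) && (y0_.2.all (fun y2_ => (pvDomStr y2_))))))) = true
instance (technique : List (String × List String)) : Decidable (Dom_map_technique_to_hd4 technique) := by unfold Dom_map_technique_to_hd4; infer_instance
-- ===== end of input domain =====

-- B replaces A's phase-set build plus priority scan by one running-minimum pass over the tactics (objective: simpler).

-- TACTIC_HD4_MAP (module constant shared by both Pythons)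
def tacticHd4Map : PySem.Dict String String := PySem.Dict.mk
  [("reconnaissance", "HUNT"), ("resource-development", "HUNT"),
   ("initial-access", "DETECT"), ("execution", "DETECT"),
   ("persistence", "DISABLE"), ("privilege-escalation", "DISABLE"),
   ("defense-evasion", "DISRUPT"), ("credential-access", "DISRUPT"),
   ("discovery", "DETECT"), ("lateral-movement", "DISRUPT"),
   ("collection", "DISRUPT"), ("command-and-control", "DISABLE"),
   ("exfiltration", "DOMINATE"), ("impact", "DOMINATE")]

-- ===== PORT A =====
-- (the `isinstance(tactics, str)` branch never fires under the type convention: values are List String)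
def map_technique_to_hd4 (technique : List (String × List String)) : String :=
  let d := PySem.Dict.mk technique
  let t1 := d.getD "tactic" []                                 -- technique.get("tactic", [])
  let tactics := if t1 = [] then d.getD "tactics" [] else t1   -- `or`: empty list is falsy
  let hd4_phases := tactics.foldl (fun s tactic =>
      let tacticNorm := PySem.Str.replace (PySem.Str.lower tactic) " " "-"
      if tacticHd4Map.contains tacticNorm then
        PySem.Set.add s (tacticHd4Map.getD tacticNorm "")      -- TACTIC_HD4_MAP[tactic_norm]; key present by the guard
      else s) PySem.Set.empty
  let priority := ["DOMINATE", "DISRUPT", "DISABLE", "DETECT", "HUNT"]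
  match priority.find? (fun phase => PySem.Set.contains hd4_phases phase) with  -- for-loop with early return
  | some phase => phase
  | none => "DETECT"

-- ===== PORT B =====
def priorityB : List String := ["DOMINATE", "DISRUPT", "DISABLE", "DETECT", "HUNT"]  -- _PRIORITY

-- _RANK.get(po, 5) where _RANK = {phase: index in _PRIORITY}; argument is the Option from TACTIC_HD4_MAP.get
def rankOf (po : Option String) : Nat :=
  match po with
  | some "DOMINATE" => 0
  | some "DISRUPT" => 1
  | some "DISABLE" => 2
  | some "DETECT" => 3
  | some "HUNT" => 4
  | _ => 5

def map_technique_to_hd4_alt (technique : List (String × List String)) : String :=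
  let d := PySem.Dict.mk technique
  let t1 := d.getD "tactic" []
  let tactics := if t1 = [] then d.getD "tactics" [] else t1
  let best := tactics.foldl (fun best tactic =>
      let r := rankOf (tacticHd4Map.get? (PySem.Str.replace (PySem.Str.lower tactic) " " "-"))
      if r < best then r else best) 5
  if best < 5 then priorityB.getD best "DETECT" else "DETECT"  -- _PRIORITY[best], in range by the guard

-- ===== PRECONDITION & SPEC =====
def Spec_map_technique_to_hd4 (technique : List (String × List String)) (out : String) : Prop := out = map_technique_to_hd4_alt technique
instance (technique : List (String × List String)) (out : String) : Decidable (Spec_map_technique_to_hd4 technique out) := by unfold Spec_map_technique_to_hd4; infer_instance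

-- ===== CLAIM (what is proved, stated in full; the proofs are below) =====
def Claim_equal_map_technique_to_hd4 : Prop := ∀ (technique : List (String × List String)), Dom_map_technique_to_hd4 technique → Spec_map_technique_to_hd4 technique (map_technique_to_hd4 technique)

-- ===== LEMMAS AND PROOFS =====

-- rank of a single phase string
def rank (p : String) : Nat := rankOf (some p)

-- minimum rank in a list of phases, starting from b
def bestFrom (b : Nat) (l : List String) : Nat := l.foldl (fun b p => min b (rank p)) b

theorem bestFrom_le (b : Nat) (l : List String) : bestFrom b l ≤ b := by
  unfold bestFrom
  induction l generalizing b with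
  | nil => exact Nat.le_of_eq rfl
  | cons p l ih =>
    have := ih (min b (rank p))
    simp only [List.foldl] at *
    omega

theorem bestFrom_le_rank (b : Nat) (l : List String) (p : String) (hp : p ∈ l) :
    bestFrom b l ≤ rank p := by
  induction l generalizing b with
  | nil => cases hp
  | cons q l ih =>
    rcases List.mem_cons.mp hp with hp | hp
    · subst hp
      have := bestFrom_le (min b (rank p)) l
      simp only [bestFrom, List.foldl] at this ⊢
      omega
    · exact ih _ hp

theorem bestFrom_append (b : Nat) (l : List String) (p : String) :
    bestFrom b (l ++ [p]) = min (bestFrom b l) (rank p) := by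
  simp [bestFrom, List.foldl_append]

theorem rank_inj (p : String) (h : rank p < 5) :
    priorityB.getD (rank p) "DETECT" = p := by
  unfold rank rankOf at *
  split at h <;> simp_all [priorityB]

theorem bestFrom_mem (b : Nat) (l : List String) (h : bestFrom b l < b) :
    ∃ p ∈ l, rank p = bestFrom b l := by
  induction l generalizing b with
  | nil => simp [bestFrom] at h
  | cons q l ih =>
    by_cases hlt : bestFrom (min b (rank q)) l < min b (rank q)
    · obtain ⟨p, hp, hr⟩ := ih _ hlt
      refine ⟨p, List.mem_cons_of_mem _ hp, ?_⟩
      simp only [bestFrom, List.foldl] at hr ⊢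
      omega
    · have hle := bestFrom_le (min b (rank q)) l
      refine ⟨q, List.mem_cons_self, ?_⟩
      simp only [bestFrom, List.foldl] at h hle hlt ⊢
      omega

-- any value TACTIC_HD4_MAP returns is one of the five phases
theorem get?_map_rank (k : String) (p : String) (h : tacticHd4Map.get? k = some p) :
    rank p < 5 := by
  have hmem := PySem.Dict.mem_items_of_get?_eq_some _ h
  simp only [tacticHd4Map] at hmem
  have : p = "HUNT" ∨ p = "DETECT" ∨ p = "DISABLE" ∨ p = "DISRUPT" ∨ p = "DOMINATE" := by
    fin_cases hmem <;> simp
  rcases this with h | h | h | h | h <;> subst h <;> decide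

-- the parallel-fold invariant: B's running minimum equals the min rank of A's set
theorem fold_invariant (ts : List String) (s : List String) (b : Nat) (hb : bestFrom 5 s = b)
    (hble : b ≤ 5) :
    bestFrom 5 (ts.foldl (fun s tactic =>
      let tacticNorm := PySem.Str.replace (PySem.Str.lower tactic) " " "-"
      if tacticHd4Map.contains tacticNorm then
        PySem.Set.add s (tacticHd4Map.getD tacticNorm "")
      else s) s) =
    ts.foldl (fun best tactic =>
      let r := rankOf (tacticHd4Map.get? (PySem.Str.replace (PySem.Str.lower tactic) " " "-"))
      if r < best then r else best) b := by
  induction ts generalizing s b with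
  | nil => simpa using hb
  | cons t ts ih =>
    simp only [List.foldl]
    set k := PySem.Str.replace (PySem.Str.lower t) " " "-" with hk
    rcases hg : tacticHd4Map.get? k with _ | p
    · have hc : tacticHd4Map.contains k = false := by
        rw [PySem.Dict.contains_eq_isSome_get?, hg]; rfl
      rw [hc]
      have h5r : rankOf none = 5 := rfl
      simp only [h5r]
      have h5 : ¬ (5 < b) := by omega
      rw [if_neg h5]
      exact ih s b hb hble
    · have hc : tacticHd4Map.contains k = true := by
        rw [PySem.Dict.contains_eq_isSome_get?, hg]; rfl
      have hgd : tacticHd4Map.getD k "" = p := by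
        rw [PySem.Dict.getD_eq_get?_getD, hg]; rfl
      rw [hc, if_pos rfl, hgd]
      have hrk : rank p < 5 := get?_map_rank k p hg
      have hro : rankOf (some p) = rank p := rfl
      rw [hro]
      by_cases hmem : p ∈ s
      · have hadd : PySem.Set.add s p = s := by
          simp [PySem.Set.add, hmem]
        rw [hadd]
        have hle2 : bestFrom 5 s ≤ rank p := bestFrom_le_rank 5 s p hmem
        have hng : ¬ (rank p < b) := by omega
        rw [if_neg hng]
        exact ih s b hb hble
      · have hadd : PySem.Set.add s p = s ++ [p] := by
          simp [PySem.Set.add, hmem]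
        rw [hadd]
        apply ih
        · rw [bestFrom_append, hb]
          simp only [rank]
          split_ifs <;> omega
        · simp only [rank] at hrk
          split_ifs <;> omega

-- priority scan of a set equals the answer read off its minimum rank
theorem scan_eq_answer (s : List String) :
    (match (["DOMINATE", "DISRUPT", "DISABLE", "DETECT", "HUNT"].find?
        (fun phase => PySem.Set.contains s phase)) with
      | some phase => phase
      | none => "DETECT") =
    (if bestFrom 5 s < 5 then priorityB.getD (bestFrom 5 s) "DETECT" else "DETECT") := by
  by_cases h5 : bestFrom 5 s < 5
  · obtain ⟨p, hp, hr⟩ := bestFrom_mem 5 s h5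
    rw [if_pos h5]
    have hPne : ∀ j, j < bestFrom 5 s → priorityB.getD j "DETECT" ∉ s := by
      intro j hj hmem
      have hj5 : j < 5 := by omega
      have hrj : rank (priorityB.getD j "DETECT") = j := by
        interval_cases j <;> rfl
      have hle := bestFrom_le_rank 5 s _ hmem
      omega
    have hpmem : priorityB.getD (bestFrom 5 s) "DETECT" ∈ s := by
      rw [← hr, rank_inj p (hr ▸ h5)]; exact hp
    obtain ⟨n, hn⟩ : ∃ n, bestFrom 5 s = n := ⟨_, rfl⟩
    rw [hn] at hpmem hPne h5 ⊢
    interval_cases n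
    · simp only [priorityB, List.getD] at hpmem
      simp_all [List.find?, PySem.Set.contains, priorityB]
    · have h0 : ("DOMINATE" : String) ∉ s := by
        have := hPne 0 (by omega); simpa [priorityB] using this
      simp only [priorityB, List.getD] at hpmem
      simp_all [List.find?, PySem.Set.contains, priorityB]
    · have h0 : ("DOMINATE" : String) ∉ s := by
        have := hPne 0 (by omega); simpa [priorityB] using this
      have h1 : ("DISRUPT" : String) ∉ s := by
        have := hPne 1 (by omega); simpa [priorityB] using this
      simp only [priorityB, List.getD] at hpmem
      simp_all [List.find?, PySem.Set.contains, priorityB]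
    · have h0 : ("DOMINATE" : String) ∉ s := by
        have := hPne 0 (by omega); simpa [priorityB] using this
      have h1 : ("DISRUPT" : String) ∉ s := by
        have := hPne 1 (by omega); simpa [priorityB] using this
      have h2 : ("DISABLE" : String) ∉ s := by
        have := hPne 2 (by omega); simpa [priorityB] using this
      simp only [priorityB, List.getD] at hpmem
      simp_all [List.find?, PySem.Set.contains, priorityB]
    · have h0 : ("DOMINATE" : String) ∉ s := by
        have := hPne 0 (by omega); simpa [priorityB] using this
      have h1 : ("DISRUPT" : String) ∉ s := by
        have := hPne 1 (by omega); simpa [priorityB] using this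
      have h2 : ("DISABLE" : String) ∉ s := by
        have := hPne 2 (by omega); simpa [priorityB] using this
      have h3 : ("DETECT" : String) ∉ s := by
        have := hPne 3 (by omega); simpa [priorityB] using this
      simp only [priorityB, List.getD] at hpmem
      simp_all [List.find?, PySem.Set.contains, priorityB]
  · have hnot : ∀ p : String, rank p < 5 → p ∉ s := by
      intro p hp hmem
      have := bestFrom_le_rank 5 s p hmem
      omega
    rw [if_neg h5]
    have h0 : ("DOMINATE" : String) ∉ s := hnot _ (by decide)
    have h1 : ("DISRUPT" : String) ∉ s := hnot _ (by decide)
    have h2 : ("DISABLE" : String) ∉ s := hnot _ (by decide)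
    have h3 : ("DETECT" : String) ∉ s := hnot _ (by decide)
    have h4 : ("HUNT" : String) ∉ s := hnot _ (by decide)
    simp [List.find?, PySem.Set.contains, h0, h1, h2, h3, h4]

-- ===== VERDICT (by name: the statement is the Claim_ definition above) =====
theorem map_technique_to_hd4_spec : Claim_equal_map_technique_to_hd4 := by
  intro technique _
  unfold Spec_map_technique_to_hd4 map_technique_to_hd4 map_technique_to_hd4_alt
  simp only []
  generalize (if (PySem.Dict.mk technique).getD "tactic" [] = []
      then (PySem.Dict.mk technique).getD "tactics" []
      else (PySem.Dict.mk technique).getD "tactic" []) = ts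
  rw [scan_eq_answer, fold_invariant ts PySem.Set.empty 5 rfl (by omega)]
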